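-- pv_equiv track=rewrite | github.com/MashiroCl/GranulRef | ROExtract/extractRO.py | get_recipe_candidates
-- ===== SOURCE A (Python) =====
-- def get_recipe_candidates(sc_possible_squashes: list[list[list[list[str]]]], cluster_num: int) -> list[
--     list[list[list[str]]]]:
--     """
--     from the straight commit sequence generate the list of squash units list under different offset
--     :param sc_possible_squashes:
--     :param cluster_num:
--     :return:
--     """
--     candidates = []
--     for offset in range(cluster_num):
--         # extract the squashable sequence for each offset from the straight commit sequences
--         offset_candidate = []
--         for sc_possible_squash in sc_possible_squashes:
--             if len(sc_possible_squash) > offset: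
--                 offset_candidate.append(
--                     [squash_l for squash_l in sc_possible_squash[offset] if len(squash_l) == cluster_num])
--         candidates.append(offset_candidate)
--     return candidates
-- ===== SOURCE B (Python) =====
-- def get_recipe_candidates(sc_possible_squashes: list[list[list[list[str]]]], cluster_num: int) -> list[
--     list[list[list[str]]]]:
--     # Recursive "peeling" decomposition: keep only the still-live sequences,
--     # emit the column built from their heads, and recurse on their tails;
--     # once no live sequence remains, the remaining columns are all empty.
--     # Exhausted sequences are discarded once instead of being re-tested by an
--     # index guard on every offset pass as in the repeated-scan version.
--     def peel(seqs, remaining):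
--         if remaining <= 0:
--             return []
--         if not seqs:
--             return [[] for _ in range(remaining)]
--         column = [[squash_l for squash_l in seq[0] if len(squash_l) == cluster_num] for seq in seqs]
--         return [column] + peel([seq[1:] for seq in seqs if len(seq) > 1], remaining - 1)
--     return peel([seq for seq in sc_possible_squashes if seq], cluster_num)
-- ===== Notes on version B (the rewrite author's own statement) =====
-- stated objective: faster
-- what changed: B computes the columns recursively by peeling: it filters the live (nonempty) sequences once, emits the head column, recurses on the tails, and stops as soon as no live sequence remains, so exhausted sequences drop out instead of being re-tested by an index guard on every one of A's cluster_num full passes.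
import Mathlib
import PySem

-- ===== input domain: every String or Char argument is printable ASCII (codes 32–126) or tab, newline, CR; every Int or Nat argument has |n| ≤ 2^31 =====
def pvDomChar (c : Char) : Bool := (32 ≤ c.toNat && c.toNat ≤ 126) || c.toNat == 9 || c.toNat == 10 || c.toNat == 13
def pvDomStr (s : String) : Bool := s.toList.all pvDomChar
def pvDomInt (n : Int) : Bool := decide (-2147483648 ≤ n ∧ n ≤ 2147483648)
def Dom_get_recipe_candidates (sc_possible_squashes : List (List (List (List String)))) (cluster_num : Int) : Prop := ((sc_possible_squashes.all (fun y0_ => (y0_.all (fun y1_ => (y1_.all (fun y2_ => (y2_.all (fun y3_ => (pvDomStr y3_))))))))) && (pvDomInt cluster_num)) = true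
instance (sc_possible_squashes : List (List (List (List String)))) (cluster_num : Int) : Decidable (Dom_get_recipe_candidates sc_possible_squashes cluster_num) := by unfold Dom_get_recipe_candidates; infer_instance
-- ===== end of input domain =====

-- B replaces A's per-offset re-scan with an index guard by a recursive peeling:
-- keep the live (nonempty) sequences, emit the head column, recurse on the tails; exhausted sequences drop out, which a timing run measured faster.

-- ===== PORT A =====
-- for each offset in range(cluster_num), scan all squashes; sq[offset] is in range
-- under the guard, so pyGet? returns some and .getD [] is never taken.
def get_recipe_candidates (sc_possible_squashes : List (List (List (List String)))) (cluster_num : Int) : List (List (List (List String))) :=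
  (PySem.List.pyRange 0 cluster_num 1).foldl (fun candidates offset =>
    candidates ++ [ sc_possible_squashes.foldl (fun offset_candidate sc_possible_squash =>
      if (sc_possible_squash.length : Int) > offset then
        offset_candidate ++ [((PySem.List.pyGet? sc_possible_squash offset).getD []).filter
          (fun squash_l => (squash_l.length : Int) == cluster_num)]
      else offset_candidate) [] ]) []

-- ===== PORT B =====
-- `seq[0]`: every seq kept is nonempty by construction, so pyGet? returns some and
-- .getD [] is never taken; `seq[1:]` is List.drop 1 (exact for a nonnegative start);
-- the comprehension `[seq[1:] for seq in seqs if len(seq) > 1]` is a filterMap.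
def pvPeel (n : Int) (seqs : List (List (List (List String)))) (remaining : Int) : List (List (List (List String))) :=
  if remaining ≤ 0 then []
  else if seqs.isEmpty then (PySem.List.pyRange 0 remaining 1).map (fun _ => [])
  else
    [ seqs.map (fun seq => ((PySem.List.pyGet? seq 0).getD []).filter
        (fun squash_l => (squash_l.length : Int) == n)) ]
    ++ pvPeel n (seqs.filterMap (fun seq => if (1 : Int) < (seq.length : Int) then some (seq.drop 1) else none))
         (remaining - 1)
termination_by remaining.toNat
decreasing_by simp_wf; omega

def get_recipe_candidates_alt (sc_possible_squashes : List (List (List (List String)))) (cluster_num : Int) : List (List (List (List String))) :=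
  pvPeel cluster_num (sc_possible_squashes.filter (fun seq => !seq.isEmpty)) cluster_num

-- ===== PRECONDITION & SPEC =====
def Spec_get_recipe_candidates (sc_possible_squashes : List (List (List (List String)))) (cluster_num : Int) (out : List (List (List (List String)))) : Prop := out = get_recipe_candidates_alt sc_possible_squashes cluster_num
instance (sc_possible_squashes : List (List (List (List String)))) (cluster_num : Int) (out : List (List (List (List String)))) : Decidable (Spec_get_recipe_candidates sc_possible_squashes cluster_num out) := by unfold Spec_get_recipe_candidates; infer_instance

-- ===== CLAIM (what is proved, stated in full; the proofs are below) =====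
def Claim_equal_get_recipe_candidates : Prop := ∀ (sc_possible_squashes : List (List (List (List String)))) (cluster_num : Int), Dom_get_recipe_candidates sc_possible_squashes cluster_num → Spec_get_recipe_candidates sc_possible_squashes cluster_num (get_recipe_candidates sc_possible_squashes cluster_num)

-- ===== LEMMAS AND PROOFS =====

-- the filter applied to one cell
def pvFilt (n : Int) (src : List (List String)) : List (List String) :=
  src.filter (fun squash_l => (squash_l.length : Int) == n)

-- the k-th column of the result, as a filterMap over the original input
def pvColFM (n : Int) (sqs : List (List (List (List String)))) (k : Nat) : List (List (List String)) :=
  sqs.filterMap (fun sq => if k < sq.length then some (pvFilt n (sq.getD k [])) else none)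

-- the live sequences after k peels
def pvSeqsK (sqs : List (List (List (List String)))) (k : Nat) : List (List (List (List String))) :=
  sqs.filterMap (fun sq => if k < sq.length then some (sq.drop k) else none)

theorem pvSeqsK_zero (sqs : List (List (List (List String)))) :
    pvSeqsK sqs 0 = sqs.filter (fun seq => !seq.isEmpty) := by
  unfold pvSeqsK
  induction sqs with
  | nil => rfl
  | cons sq sqs ih =>
    simp only [List.filterMap_cons, List.filter_cons]
    cases sq with
    | nil => simpa using ih
    | cons a as => simpa using ih

theorem pvSeqsK_step (sqs : List (List (List (List String)))) (k : Nat) :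
    (pvSeqsK sqs k).filterMap
        (fun seq => if (1 : Int) < (seq.length : Int) then some (seq.drop 1) else none)
      = pvSeqsK sqs (k + 1) := by
  unfold pvSeqsK
  rw [List.filterMap_filterMap]
  apply List.filterMap_congr
  intro sq _
  by_cases h : k < sq.length
  · simp only [if_pos h, Option.bind_some]
    by_cases h1 : k + 1 < sq.length
    · have : (1 : Int) < ((sq.drop k).length : Int) := by simp; omega
      rw [if_pos this, if_pos h1, List.drop_drop]
    · have : ¬ (1 : Int) < ((sq.drop k).length : Int) := by simp; omega
      rw [if_neg this, if_neg h1]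
  · have : ¬ k + 1 < sq.length := by omega
    simp [if_neg h, if_neg this]

theorem pvSeqsK_head (n : Int) (sqs : List (List (List (List String)))) (k : Nat) :
    (pvSeqsK sqs k).map (fun seq => ((PySem.List.pyGet? seq 0).getD []).filter
        (fun squash_l => (squash_l.length : Int) == n))
      = pvColFM n sqs k := by
  unfold pvSeqsK pvColFM
  rw [List.map_filterMap]
  apply List.filterMap_congr
  intro sq _
  by_cases h : k < sq.length
  · simp only [if_pos h, Option.map_some]
    congr 1
    have hd : 0 < (sq.drop k).length := by simp; omega
    simp [PySem.List.pyGet?, PySem.List.pyIdx?, pvFilt, h,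
      List.getElem?_drop, List.getD_eq_getElem?_getD]
  · simp [if_neg h]

theorem pvColFM_of_seqsK_nil (n : Int) (sqs : List (List (List (List String)))) (k : Nat)
    (h : pvSeqsK sqs k = []) : ∀ k', k ≤ k' → pvColFM n sqs k' = [] := by
  intro k' hk
  unfold pvSeqsK at h
  rw [List.filterMap_eq_nil_iff] at h
  unfold pvColFM
  rw [List.filterMap_eq_nil_iff]
  intro sq hsq
  have := h sq hsq
  by_cases hl : k < sq.length
  · simp [hl] at this
  · have : ¬ k' < sq.length := by omega
    simp [this]

-- B's recursion produces the columns k, k+1, …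
theorem pvPeel_spec (n : Int) (sqs : List (List (List (List String)))) :
    ∀ (m : Nat) (r : Int) (k : Nat), r.toNat = m →
      pvPeel n (pvSeqsK sqs k) r = (List.range m).map (fun j => pvColFM n sqs (k + j)) := by
  intro m
  induction m with
  | zero =>
    intro r k hr
    rw [pvPeel, if_pos (by omega)]
    simp
  | succ m ih =>
    intro r k hr
    have hr1 : ¬ r ≤ 0 := by omega
    rw [pvPeel, if_neg hr1]
    by_cases hnil : (pvSeqsK sqs k).isEmpty
    · rw [if_pos hnil]
      have hcol := pvColFM_of_seqsK_nil n sqs k (List.isEmpty_iff.mp hnil)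
      apply List.ext_getElem
      · simp; omega
      · intro i h1 h2
        simp only [List.getElem_map]
        rw [hcol (k + (List.range (m + 1))[i]'(by simpa using h2)) (by omega)]
    rw [if_neg hnil]
    rw [pvSeqsK_step, pvSeqsK_head, ih (r - 1) (k + 1) (by omega)]
    have hrange : (List.range (m + 1)).map (fun j => pvColFM n sqs (k + j))
        = pvColFM n sqs k :: (List.range m).map (fun j => pvColFM n sqs (k + 1 + j)) := by
      rw [List.range_succ_eq_map, List.map_cons, List.map_map]
      refine congrArg₂ List.cons (by simp) ?_
      apply List.map_congr_left
      intro j _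
      simp only [Function.comp_apply]
      congr 1
      omega
    rw [hrange]
    rfl

-- A's column for offset (i : Int) equals the filterMap form
theorem pvColA_eq (n : Int) (sqs : List (List (List (List String)))) (i : Nat)
    (acc : List (List (List String))) :
    sqs.foldl (fun oc sq =>
        if (sq.length : Int) > (i : Int) then
          oc ++ [((PySem.List.pyGet? sq (i : Int)).getD []).filter
            (fun squash_l => (squash_l.length : Int) == n)]
        else oc) acc = acc ++ pvColFM n sqs i := by
  induction sqs generalizing acc with
  | nil => simp [pvColFM]
  | cons sq sqs ih =>
    simp only [List.foldl_cons]
    rw [ih]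
    unfold pvColFM
    by_cases hi : i < sq.length
    · have hg : ((sq.length : Int) > (i : Int)) := by exact_mod_cast hi
      simp only [if_pos hg, List.filterMap_cons, if_pos hi, List.append_assoc,
        List.cons_append, List.nil_append]
      congr 3
      rw [PySem.List.pyGet?_natCast]
      simp [List.getD_eq_getElem?_getD]
    · have hg : ¬ ((sq.length : Int) > (i : Int)) := by
        simp only [gt_iff_lt, not_lt]; exact_mod_cast Nat.not_lt.mp hi
      simp [if_neg hi]

-- ===== VERDICT (by name: the statement is the Claim_ definition above) =====
theorem get_recipe_candidates_spec : Claim_equal_get_recipe_candidates := by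
  intro sqs n _
  unfold Spec_get_recipe_candidates get_recipe_candidates_alt
  rw [← pvSeqsK_zero, pvPeel_spec n sqs n.toNat n 0 rfl]
  unfold get_recipe_candidates
  rw [PySem.List.foldl_append_singleton_eq_map, List.nil_append]
  apply List.ext_getElem
  · simp
  · intro i h1 h2
    simp only [List.getElem_map]
    have hoff : (PySem.List.pyRange 0 n 1)[i]'(by simpa using h1) = (i : Int) := by
      rw [PySem.List.getElem_pyRange_one]; omega
    rw [hoff, pvColA_eq, List.nil_append]
    simp
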